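-- pv_equiv track=rewrite | github.com/cjean-pierre/bechdelai | bechdelai/utils/timeline.py | fn_timeline
-- ===== SOURCE A (Python) =====
-- def fn_timeline(x):
--
--     try:
--         x = x.tolist()
--     except:
--         pass
--
--     seq_id = 0
--     seq_ids = []
--
--     for i in range(len(x) - 1):
--         seq_ids.append(seq_id)
--         if (x[i+1] - x[i]) > 1:
--             seq_id += 1
--
--     # Add last element
--     seq_ids.append(seq_id)
--     return seq_ids
-- ===== SOURCE B (Python) =====
-- def fn_timeline(x):
--     try:
--         x = x.tolist()
--     except:
--         pass
--     # cut positions: a new group starts right after every gap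
--     cuts = [0] + [i + 1 for i in range(len(x) - 1) if x[i + 1] - x[i] > 1] + [len(x)]
--     # emit the k-th segment as a constant run of its group id
--     out = []
--     for k in range(len(cuts) - 1):
--         out += [k] * (cuts[k + 1] - cuts[k])
--     return out
-- ===== Notes on version B (the rewrite author's own statement) =====
-- stated objective: alternative
-- what changed: Replaces A's element-by-element pass with a mutable running group-id counter by a segmentation: first compute the list of cut positions (one after each gap), then build the output as concatenated constant runs [k]*(segment length).
-- intended difference: On the empty list A returns a one-element output (its unconditional trailing append emits a group id for a nonexistent element); B returns an empty list, the intended grouping of an empty sequence. — e.g. on fn_timeline([]): A returns [0], B returns []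
import Mathlib
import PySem

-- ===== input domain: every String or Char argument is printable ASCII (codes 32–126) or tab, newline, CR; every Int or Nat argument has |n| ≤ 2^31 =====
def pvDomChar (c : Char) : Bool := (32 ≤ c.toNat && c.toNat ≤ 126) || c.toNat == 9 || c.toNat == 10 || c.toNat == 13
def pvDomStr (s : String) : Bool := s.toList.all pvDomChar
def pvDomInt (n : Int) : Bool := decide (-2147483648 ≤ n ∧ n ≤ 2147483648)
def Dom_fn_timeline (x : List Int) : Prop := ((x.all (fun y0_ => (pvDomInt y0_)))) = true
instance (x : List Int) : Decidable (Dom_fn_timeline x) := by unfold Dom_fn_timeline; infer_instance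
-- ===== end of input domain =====

-- B replaces A's running-counter pass by a segmentation: cut positions first, then the output as
-- concatenated constant runs; on the empty list A and B differ as stated in D_ below.
-- ===== PORT A =====
def fn_timeline (x : List Int) : List Int :=
  -- seq_id = 0; seq_ids = []; for i in range(len(x)-1): append seq_id; if x[i+1]-x[i] > 1: seq_id += 1; append seq_id
  let st := (PySem.List.pyRange 0 ((x.length : Int) - 1) 1).foldl
    (fun (st : Int × List Int) i =>
      let st := (st.1, st.2 ++ [st.1])
      if PySem.List.pyGetD x (i + 1) 0 - PySem.List.pyGetD x i 0 > 1 then (st.1 + 1, st.2)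
      else st)
    (0, [])
  st.2 ++ [st.1]

-- ===== PORT B =====
def fn_timeline_alt (x : List Int) : List Int :=
  -- cuts = [0] + [i+1 for i in range(len(x)-1) if x[i+1]-x[i] > 1] + [len(x)]
  let cuts : List Int := [0] ++ ((PySem.List.pyRange 0 ((x.length : Int) - 1) 1).filter
      (fun i => decide (PySem.List.pyGetD x (i + 1) 0 - PySem.List.pyGetD x i 0 > 1))).map (fun i => i + 1)
    ++ [(x.length : Int)]
  -- out = []; for k in range(len(cuts)-1): out += [k] * (cuts[k+1] - cuts[k])
  (PySem.List.pyRange 0 ((cuts.length : Int) - 1) 1).foldl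
    (fun out k => out ++ PySem.List.pyRepeat [k] (PySem.List.pyGetD cuts (k + 1) 0 - PySem.List.pyGetD cuts k 0))
    []

-- ===== PRECONDITION & SPEC =====
-- On the empty list A returns a one-element output, the singleton zero (its unconditional trailing
-- append emits a group id for a nonexistent element); B returns the empty list, the intended
-- grouping of an empty sequence.
def D_fn_timeline (x : List Int) : Prop := x = []
instance (x : List Int) : Decidable (D_fn_timeline x) := by unfold D_fn_timeline; infer_instance
def Spec_fn_timeline (x : List Int) (out : List Int) : Prop := ¬ D_fn_timeline x → out = fn_timeline_alt x
instance (x : List Int) (out : List Int) : Decidable (Spec_fn_timeline x out) := by unfold Spec_fn_timeline; infer_instance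
def pvDiffWitness_fn_timeline : List Int := ([])
def pvDiffWitnessOut_fn_timeline : (List Int) × (List Int) := ([0], [])

-- ===== CLAIM (what is proved, stated in full; the proofs are below) =====
def Claim_unchanged_fn_timeline : Prop := ∀ (x : List Int), Dom_fn_timeline x → Spec_fn_timeline x (fn_timeline x)
def Claim_changed_fn_timeline : Prop := Dom_fn_timeline (pvDiffWitness_fn_timeline) ∧ D_fn_timeline (pvDiffWitness_fn_timeline) ∧ fn_timeline (pvDiffWitness_fn_timeline) = pvDiffWitnessOut_fn_timeline.1 ∧ fn_timeline_alt (pvDiffWitness_fn_timeline) = pvDiffWitnessOut_fn_timeline.2 ∧ pvDiffWitnessOut_fn_timeline.1 ≠ pvDiffWitnessOut_fn_timeline.2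
def Claim_exact_fn_timeline : Prop := ∀ (x : List Int), Dom_fn_timeline x → D_fn_timeline x → fn_timeline x ≠ fn_timeline_alt x

-- ===== LEMMAS AND PROOFS =====
-- the 0/1 gap indicator A's loop branches on; the gap count before a position; the gap positions
def pvInd (x : List Int) (i : Int) : Int :=
  if PySem.List.pyGetD x (i + 1) 0 - PySem.List.pyGetD x i 0 > 1 then 1 else 0

def pvCnt (x : List Int) (i : Int) : Int :=
  (((PySem.List.pyRange 0 i 1).filter
      (fun j => decide (PySem.List.pyGetD x (j + 1) 0 - PySem.List.pyGetD x j 0 > 1))).map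
    (fun _ => (1 : Int))).sum

def pvG (x : List Int) : List Int :=
  (PySem.List.pyRange 0 ((x.length : Int) - 1) 1).filter
    (fun i => decide (PySem.List.pyGetD x (i + 1) 0 - PySem.List.pyGetD x i 0 > 1))

-- step of A's loop, rephrased over the 0/1 gap indicator it branches on
def pvStepA (st : Int × List Int) (g : Int) : Int × List Int :=
  (st.1 + g, st.2 ++ [st.1])

-- B's run expansion over the interior cut chain, as a structural recursion
def pvExpand (nn : Int) : Int → Int → List Int → List Int
  | k, p, [] => PySem.List.pyRepeat [k] (nn - p)
  | k, p, g :: G => PySem.List.pyRepeat [k] (g + 1 - p) ++ pvExpand nn (k + 1) (g + 1) G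

theorem pvFold_scanl (g : List Int) : ∀ (s : Int) (l : List Int),
    (g.foldl pvStepA (s, l)).2 ++ [(g.foldl pvStepA (s, l)).1]
      = l ++ List.scanl (· + ·) s g := by
  induction g with
  | nil => intro s l; rw [List.scanl_nil]; rfl
  | cons gi gs ih =>
    intro s l
    rw [List.scanl_cons, List.foldl_cons]
    simp only [pvStepA]
    rw [ih (s + gi) (l ++ [s]), List.append_assoc]
    rfl

theorem pvCnt_succ (x : List Int) (a : Int) (ha : 0 ≤ a) :
    pvCnt x (a + 1) = pvCnt x a + pvInd x a := by
  unfold pvCnt pvInd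
  rw [PySem.List.pyRange_one_succ_right ha, List.filter_append, List.map_append, List.sum_append]
  by_cases h : PySem.List.pyGetD x (a + 1) 0 - PySem.List.pyGetD x a 0 > 1 <;>
    simp [h]

theorem pvScanl_eq_map_cnt (x : List Int) : ∀ (k : Nat) (a : Int), 0 ≤ a →
    List.scanl (· + ·) (pvCnt x a) ((PySem.List.pyRange a (a + k) 1).map (pvInd x))
      = (PySem.List.pyRange a (a + k + 1) 1).map (pvCnt x) := by
  intro k
  induction k with
  | zero =>
    intro a ha
    rw [PySem.List.pyRange_one_eq_nil (by omega), PySem.List.pyRange_one_cons (by omega),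
      PySem.List.pyRange_one_eq_nil (by omega)]
    simp
  | succ k ih =>
    intro a ha
    have hc : ((k + 1 : Nat) : Int) = (k : Int) + 1 := by push_cast; ring
    rw [hc, PySem.List.pyRange_one_cons (a := a) (by omega), List.map_cons, List.scanl_cons,
      PySem.List.pyRange_one_cons (a := a) (b := a + (k + 1) + 1) (by omega), List.map_cons,
      ← pvCnt_succ x a ha]
    refine congrArg _ ?_
    have h := ih (a + 1) (by omega)
    ring_nf at h ⊢
    exact h

-- A's result is the per-position gap count, over positions 0..len-1 (x nonempty)
theorem pvA_eq_map_cnt (x : List Int) (hx : x ≠ []) :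
    fn_timeline x = (PySem.List.pyRange 0 (x.length : Int) 1).map (pvCnt x) := by
  unfold fn_timeline
  have hbody :
      (fun (st : Int × List Int) (i : Int) =>
        let st := (st.1, st.2 ++ [st.1])
        if PySem.List.pyGetD x (i + 1) 0 - PySem.List.pyGetD x i 0 > 1 then (st.1 + 1, st.2)
        else st)
      = fun (st : Int × List Int) (i : Int) => pvStepA st (pvInd x i) := by
    funext st i
    by_cases h : PySem.List.pyGetD x (i + 1) 0 - PySem.List.pyGetD x i 0 > 1 <;>
      simp [h, pvStepA, pvInd]
  rw [hbody, ← List.foldl_map, pvFold_scanl, List.nil_append]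
  have hn : 1 ≤ (x.length : Int) := by
    rcases x with _ | _
    · exact absurd rfl hx
    · simp
  have h0 : pvCnt x 0 = 0 := by
    unfold pvCnt
    rw [PySem.List.pyRange_one_eq_nil (by omega)]
    rfl
  have key := pvScanl_eq_map_cnt x ((x.length : Int) - 1).toNat 0 (le_refl 0)
  have he : (0 : Int) + (((x.length : Int) - 1).toNat : Int) = (x.length : Int) - 1 := by omega
  rw [he] at key
  have he2 : (x.length : Int) - 1 + 1 = (x.length : Int) := by ring
  rw [he2, h0] at key
  rw [key]

-- the flatMap over cut indices is the structural run expansion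
theorem pvFlat (nn : Int) : ∀ (G : List Int) (k p : Int),
    (List.range (G.length + 1)).flatMap
      (fun (t : Nat) => PySem.List.pyRepeat [k + (t : Int)]
        ((p :: (G.map (· + 1) ++ [nn])).getD (t + 1) 0
          - (p :: (G.map (· + 1) ++ [nn])).getD t 0))
      = pvExpand nn k p G := by
  intro G
  induction G with
  | nil =>
    intro k p
    show (List.range 1).flatMap _ = _
    rw [List.range_one, List.flatMap_cons, List.flatMap_nil]
    simp only [List.getD_cons_succ, List.getD_cons_zero, Nat.cast_zero, add_zero, List.append_nil]
    rfl
  | cons g G ih =>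
    intro k p
    show (List.range (G.length + 1 + 1)).flatMap _ = _
    rw [List.range_succ_eq_map, List.flatMap_cons, List.flatMap_map]
    have htail :
        (fun (t : Nat) => PySem.List.pyRepeat [k + ((t.succ : Nat) : Int)]
          ((p :: ((g :: G).map (· + 1) ++ [nn])).getD (t.succ + 1) 0
            - (p :: ((g :: G).map (· + 1) ++ [nn])).getD t.succ 0))
        = (fun (t : Nat) => PySem.List.pyRepeat [(k + 1) + (t : Int)]
          (((g + 1) :: (G.map (· + 1) ++ [nn])).getD (t + 1) 0
            - ((g + 1) :: (G.map (· + 1) ++ [nn])).getD t 0)) := by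
      funext t
      have hk : k + ((t.succ : Nat) : Int) = (k + 1) + (t : Int) := by push_cast; ring
      rw [hk]
      rfl
    rw [htail, ih (k + 1) (g + 1)]
    simp only [List.getD_cons_succ, List.getD_cons_zero, Nat.cast_zero, add_zero, List.map_cons,
      List.cons_append]
    rfl

-- the run expansion over valid cut chains is the per-position gap count
theorem pvExpand_eq (x : List Int) : ∀ (G : List Int) (k p : Int), 0 ≤ p → p ≤ (x.length : Int) →
    G.Pairwise (· < ·) →
    (∀ g ∈ G, p ≤ g + 1 ∧ g + 1 ≤ (x.length : Int)) →
    (∀ j : Int, p ≤ j → j < (x.length : Int) →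
      pvCnt x j = k + ((G.filter (fun g => decide (g + 1 ≤ j))).length : Int)) →
    pvExpand (x.length : Int) k p G = (PySem.List.pyRange p (x.length : Int) 1).map (pvCnt x) := by
  intro G
  induction G with
  | nil =>
    intro k p hp0 hpn _ _ hcnt
    have hconst : ∀ j ∈ PySem.List.pyRange p (x.length : Int) 1, pvCnt x j = (fun _ : Int => k) j := by
      intro j hj
      obtain ⟨h1, h2⟩ := PySem.List.mem_pyRange_one.mp hj
      simpa using hcnt j h1 h2
    rw [List.map_congr_left hconst, List.map_const', PySem.List.length_pyRange_one]
    simp [pvExpand, PySem.List.pyRepeat_singleton]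
  | cons g G ih =>
    intro k p hp0 hpn hpair hmem hcnt
    obtain ⟨hpg, hgn⟩ := hmem g (List.mem_cons_self)
    rw [PySem.List.pyRange_one_append p (g + 1) (x.length : Int) hpg hgn, List.map_append]
    show PySem.List.pyRepeat [k] (g + 1 - p) ++ pvExpand _ (k + 1) (g + 1) G = _
    have hpairg := List.pairwise_cons.mp hpair
    refine congrArg₂ (· ++ ·) ?_ ?_
    · have hconst : ∀ j ∈ PySem.List.pyRange p (g + 1) 1, pvCnt x j = (fun _ : Int => k) j := by
        intro j hj
        obtain ⟨h1, h2⟩ := PySem.List.mem_pyRange_one.mp hj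
        have := hcnt j h1 (by omega)
        have hnil : (g :: G).filter (fun g' => decide (g' + 1 ≤ j)) = [] := by
          rw [List.filter_eq_nil_iff]
          intro a ha
          rcases List.mem_cons.mp ha with h | h
          · subst h; simp; omega
          · have := hpairg.1 a h
            simp; omega
        rw [hnil] at this
        simpa using this
      rw [List.map_congr_left hconst, List.map_const', PySem.List.length_pyRange_one]
      simp [PySem.List.pyRepeat_singleton]
    · refine ih (k + 1) (g + 1) (by omega) hgn hpairg.2 ?_ ?_
      · intro g' hg'
        have := hpairg.1 g' hg'
        exact ⟨by omega, (hmem g' (List.mem_cons_of_mem g hg')).2⟩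
      · intro j hj1 hj2
        have h := hcnt j (by omega) hj2
        have hgj : g + 1 ≤ j := by omega
        have hg : (g :: G).filter (fun g' => decide (g' + 1 ≤ j))
            = g :: G.filter (fun g' => decide (g' + 1 ≤ j)) := by
          rw [List.filter_cons]
          simp [hgj]
        rw [hg, List.length_cons] at h
        rw [h]
        push_cast
        ring

-- B's result is the per-position gap count, over positions 0..len-1 (x nonempty)
theorem pvB_eq_map_cnt (x : List Int) (hx : x ≠ []) :
    fn_timeline_alt x = (PySem.List.pyRange 0 (x.length : Int) 1).map (pvCnt x) := by
  unfold fn_timeline_alt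
  have hn : 1 ≤ (x.length : Int) := by
    rcases x with _ | _
    · exact absurd rfl hx
    · simp
  rw [PySem.List.foldl_append_eq_flatMap, List.nil_append]
  set c : List Int := [0] ++ ((PySem.List.pyRange 0 ((x.length : Int) - 1) 1).filter
      (fun i => decide (PySem.List.pyGetD x (i + 1) 0 - PySem.List.pyGetD x i 0 > 1))).map (fun i => i + 1)
    ++ [(x.length : Int)] with hc
  have hc2 : c = (0 : Int) :: ((pvG x).map (· + 1) ++ [(x.length : Int)]) := by rw [hc]; rfl
  rw [hc2]
  have hlen : ((((0 : Int) :: ((pvG x).map (· + 1) ++ [(x.length : Int)])).length : Int) - 1)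
      = (((pvG x).length + 1 : Nat) : Int) := by simp
  rw [hlen, PySem.List.pyRange_zero_natCast, List.flatMap_map]
  have hfun :
      (fun (t : Nat) => PySem.List.pyRepeat [((t : Nat) : Int)]
        (PySem.List.pyGetD ((0 : Int) :: ((pvG x).map (· + 1) ++ [(x.length : Int)])) (((t : Nat) : Int) + 1) 0
          - PySem.List.pyGetD ((0 : Int) :: ((pvG x).map (· + 1) ++ [(x.length : Int)])) ((t : Nat) : Int) 0))
      = (fun (t : Nat) => PySem.List.pyRepeat [(0 : Int) + (t : Int)]
        (((0 : Int) :: ((pvG x).map (· + 1) ++ [(x.length : Int)])).getD (t + 1) 0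
          - ((0 : Int) :: ((pvG x).map (· + 1) ++ [(x.length : Int)])).getD t 0)) := by
    funext t
    have h1 : ((t : Nat) : Int) + 1 = (((t + 1 : Nat)) : Int) := by push_cast; ring
    rw [h1, PySem.List.pyGetD_natCast, PySem.List.pyGetD_natCast, zero_add]
  rw [hfun, pvFlat (x.length : Int) (pvG x) 0 0]
  -- instantiate the semantic lemma
  refine pvExpand_eq x (pvG x) 0 0 (le_refl 0) (by omega) ?_ ?_ ?_
  · exact (PySem.List.pairwise_lt_pyRange_one 0 ((x.length : Int) - 1)).filter _
  · intro g hg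
    obtain ⟨hgr, _⟩ := List.mem_filter.mp hg
    obtain ⟨h1, h2⟩ := PySem.List.mem_pyRange_one.mp hgr
    exact ⟨by omega, by omega⟩
  · intro j hj1 hj2
    unfold pvCnt
    rw [PySem.List.sum_map_const_int]
    have hsplit : PySem.List.pyRange 0 ((x.length : Int) - 1) 1
        = PySem.List.pyRange 0 j 1 ++ PySem.List.pyRange j ((x.length : Int) - 1) 1 :=
      PySem.List.pyRange_one_append 0 j ((x.length : Int) - 1) hj1 (by omega)
    have hfil : (pvG x).filter (fun g => decide (g + 1 ≤ j))
        = (PySem.List.pyRange 0 j 1).filter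
            (fun i => decide (PySem.List.pyGetD x (i + 1) 0 - PySem.List.pyGetD x i 0 > 1)) := by
      unfold pvG
      rw [List.filter_filter, hsplit, List.filter_append]
      have h2 : (PySem.List.pyRange j ((x.length : Int) - 1) 1).filter
          (fun a => decide (a + 1 ≤ j) &&
            decide (PySem.List.pyGetD x (a + 1) 0 - PySem.List.pyGetD x a 0 > 1)) = [] := by
        rw [List.filter_eq_nil_iff]
        intro a ha
        obtain ⟨ha1, _⟩ := PySem.List.mem_pyRange_one.mp ha
        simp
        omega
      rw [h2, List.append_nil]
      refine List.filter_congr ?_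
      intro a ha
      obtain ⟨ha1, ha2⟩ := PySem.List.mem_pyRange_one.mp ha
      simp
      omega
    rw [hfil]
    ring

-- ===== VERDICT (by name: the statement is the Claim_ definition above) =====
theorem fn_timeline_spec : Claim_unchanged_fn_timeline := by
  intro x _ hD
  unfold D_fn_timeline at hD
  rw [pvA_eq_map_cnt x hD, pvB_eq_map_cnt x hD]

theorem fn_timeline_changed : Claim_changed_fn_timeline := by
  unfold Claim_changed_fn_timeline; decide

theorem fn_timeline_tight : Claim_exact_fn_timeline := by
  intro x _ hD
  unfold D_fn_timeline at hD
  subst hD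
  decide
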